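-- pv_equiv track=rewrite | github.com/yardentamir2003/python | chapter11/5lemmings_language/main.py | word_twice
-- ===== SOURCE A (Python) =====
-- def word_twice(line):
--     word_number = 1
--     words = line.split()
--     words_dictionary = {}
--     for word in words:
--         if word not in words_dictionary:
--             words_dictionary[word] = 1
--         else:
--             return "word #{} already exists.".format(word_number)
--         word_number += 1
-- ===== SOURCE B (Python) =====
-- def word_twice(line):
--     words = line.split()
--     seconds = []
--     for w in set(words):
--         if words.count(w) > 1:
--             j = words.index(w)
--             seconds.append(j + 1 + words[j + 1:].index(w))
--     if seconds:
--         return "word #{} already exists.".format(min(seconds) + 1)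
-- ===== Notes on version B (the rewrite author's own statement) =====
-- stated objective: alternative
-- what changed: Instead of A's ordered scan with a seen-dictionary and early return, B computes for each distinct duplicated word (set + count) its second-occurrence index via index-after-first-occurrence, and takes the minimum of those indices; no ordered scan, no early exit.
import Mathlib
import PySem

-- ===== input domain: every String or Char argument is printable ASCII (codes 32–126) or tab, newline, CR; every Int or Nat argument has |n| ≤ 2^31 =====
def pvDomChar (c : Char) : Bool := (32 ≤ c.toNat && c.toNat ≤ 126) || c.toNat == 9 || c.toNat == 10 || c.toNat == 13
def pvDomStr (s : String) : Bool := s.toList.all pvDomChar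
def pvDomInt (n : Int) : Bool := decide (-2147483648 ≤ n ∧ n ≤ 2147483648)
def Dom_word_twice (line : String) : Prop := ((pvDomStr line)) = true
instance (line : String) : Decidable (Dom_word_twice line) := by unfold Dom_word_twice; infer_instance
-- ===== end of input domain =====

-- B replaces A's ordered seen-dictionary scan by a staged computation: for each distinct
-- duplicated word (set + count) it computes that word's second-occurrence index and returns
-- the minimum of those indices (alternative decomposition; not claimed faster).

-- ===== PORT A =====
-- the for-loop over words with state (words_dictionary, word_number)
def pvALoop (d : PySem.Dict String Int) (n : Int) : List String → Option String
  | [] => none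
  | w :: ws =>
      if d.contains w = false then
        pvALoop (d.insert w 1) (n + 1) ws
      else
        some ("word #" ++ PySem.Int.toStr n ++ " already exists.")

def word_twice (line : String) : Option String :=
  pvALoop PySem.Dict.empty 1 (PySem.Str.split₀ line)

-- ===== PORT B =====
-- the for-loop over set(words): for each w with words.count(w) > 1, append the
-- second-occurrence index j + 1 + words[j+1:].index(w), where j = words.index(w).
-- words[j+1:] is words.drop (j+1), exact since j+1 ≥ 0; the guard count > 1 guarantees
-- w ∈ words and w ∈ words[j+1:], so Python's .index cannot raise and the getD defaults
-- are unreachable.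
def pvBSeconds (words : List String) : List String → List Nat
  | [] => []
  | w :: ws =>
      if 1 < PySem.List.count words w then
        let j := (PySem.List.index? words w).getD 0
        let k := (PySem.List.index? (words.drop (j + 1)) w).getD 0
        (j + 1 + k) :: pvBSeconds words ws
      else pvBSeconds words ws

def word_twice_alt (line : String) : Option String :=
  let words := PySem.Str.split₀ line
  let seconds := pvBSeconds words (PySem.Set.ofList words)
  match PySem.List.min? seconds (fun x => x) with
  | some m => some ("word #" ++ PySem.Int.toStr ((m : Int) + 1) ++ " already exists.")
  | none => none

-- ===== PRECONDITION & SPEC =====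
def Spec_word_twice (line : String) (out : Option String) : Prop := out = word_twice_alt line
instance (line : String) (out : Option String) : Decidable (Spec_word_twice line out) := by unfold Spec_word_twice; infer_instance

-- ===== CLAIM (what is proved, stated in full; the proofs are below) =====
def Claim_equal_word_twice : Prop := ∀ (line : String), Dom_word_twice line → Spec_word_twice line (word_twice line)

-- ===== LEMMAS AND PROOFS =====

-- 'position i is a duplicate': the word at i already occurs before i
def pvDup (words : List String) (i : Nat) : Prop :=
  ∃ h : i < words.length, words[i] ∈ words.take i

-- the least duplicate position ≥ n (reference function for both proofs)
def pvFirst (words : List String) (n : Nat) : Option Nat :=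
  if h : n < words.length then
    (if words[n] ∈ words.take n then some n else pvFirst words (n + 1))
  else none
termination_by words.length - n

lemma pvFirst_none (words : List String) (n : Nat) (h : pvFirst words n = none) :
    ∀ j, n ≤ j → ¬ pvDup words j := by
  intro j hnj hd
  obtain ⟨hj, hmem⟩ := hd
  induction hn : words.length - n generalizing n with
  | zero => unfold pvFirst at h; rw [dif_neg (by omega)] at h; omega
  | succ m ih =>
      unfold pvFirst at h
      rw [dif_pos (by omega)] at h
      by_cases hc : words[n]'(by omega) ∈ words.take n
      · rw [if_pos hc] at h
        exact Option.some_ne_none n h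
      · rw [if_neg hc] at h
        rcases Nat.eq_or_lt_of_le hnj with rfl | hlt
        · exact hc hmem
        · exact ih (n + 1) h hlt (by omega)

lemma pvFirst_some (words : List String) (n i : Nat) (h : pvFirst words n = some i) :
    pvDup words i ∧ ∀ j, n ≤ j → j < i → ¬ pvDup words j := by
  induction hn : words.length - n generalizing n with
  | zero =>
      unfold pvFirst at h; rw [dif_neg (by omega)] at h
      exact absurd h.symm (Option.some_ne_none i)
  | succ m ih =>
      unfold pvFirst at h
      rw [dif_pos (by omega)] at h
      by_cases hc : words[n]'(by omega) ∈ words.take n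
      · rw [if_pos hc] at h
        obtain rfl : n = i := Option.some.inj h
        exact ⟨⟨by omega, hc⟩, fun j h1 h2 => by omega⟩
      · rw [if_neg hc] at h
        obtain ⟨hd, hmin⟩ := ih (n + 1) h (by omega)
        refine ⟨hd, fun j h1 h2 hdj => ?_⟩
        rcases Nat.eq_or_lt_of_le h1 with rfl | hlt
        · exact hc (hdj.choose_spec)
        · exact hmin j hlt h2 hdj

-- A's dict loop equals the least-duplicate reference: d's keys are exactly the seen prefix p
lemma pvALoop_eq (ws : List String) : ∀ (p : List String) (d : PySem.Dict String Int),
    (∀ w, d.contains w = true ↔ w ∈ p) →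
    pvALoop d ((p.length : Int) + 1) ws =
      (pvFirst (p ++ ws) p.length).map
        (fun i => "word #" ++ PySem.Int.toStr ((i : Int) + 1) ++ " already exists.") := by
  induction ws with
  | nil =>
      intro p d _
      unfold pvFirst
      rw [dif_neg (by simp)]
      simp [pvALoop]
  | cons w ws ih =>
      intro p d hd
      unfold pvFirst
      rw [dif_pos (by simp)]
      have hget : (p ++ w :: ws)[p.length]'(by simp) = w := by
        rw [List.getElem_append_right (Nat.le_refl p.length)]
        simp
      have htake : (p ++ w :: ws).take p.length = p := by
        simp [List.take_append_of_le_length (Nat.le_refl p.length)]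
      rw [hget, htake]
      by_cases hmem : w ∈ p
      · simp only [pvALoop]
        rw [if_neg (by simp [(hd w).2 hmem]), if_pos hmem]
        simp
      · simp only [pvALoop]
        rw [if_pos (by rcases h : d.contains w with _ | _ <;> simp_all), if_neg hmem]
        have hd' : ∀ x, (d.insert w 1).contains x = true ↔ x ∈ p ++ [w] := by
          intro x
          rw [PySem.Dict.contains_insert]
          constructor
          · intro hx
            rcases Bool.or_eq_true_iff.1 hx with hx | hx
            · simp [List.mem_append, (beq_iff_eq).1 hx]
            · exact List.mem_append.2 (Or.inl ((hd x).1 hx))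
          · intro hx
            rcases List.mem_append.1 hx with hx | hx
            · exact Bool.or_eq_true_iff.2 (Or.inr ((hd x).2 hx))
            · simp at hx; simp [hx]
        have h1 := ih (p ++ [w]) (d.insert w 1) hd'
        simp only [List.append_assoc, List.singleton_append, List.length_append,
          List.length_singleton] at h1
        rw [show ((p.length : Int) + 1 + 1) = ((p.length + 1 : Nat) : Int) + 1 by push_cast; ring]
        exact h1

-- membership in B's seconds list
lemma mem_pvBSeconds (words : List String) (l : List String) (s : Nat) :
    s ∈ pvBSeconds words l ↔ ∃ w ∈ l, 1 < PySem.List.count words w ∧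
      s = (PySem.List.index? words w).getD 0 + 1 +
          (PySem.List.index? (words.drop ((PySem.List.index? words w).getD 0 + 1)) w).getD 0 := by
  induction l with
  | nil => simp [pvBSeconds]
  | cons w ws ih =>
      simp only [pvBSeconds]
      split_ifs with hc
      · simp only [List.mem_cons, ih]
        constructor
        · rintro (rfl | ⟨v, hv, h1, h2⟩)
          · exact ⟨w, Or.inl rfl, hc, rfl⟩
          · exact ⟨v, Or.inr hv, h1, h2⟩
        · rintro ⟨v, hv, h1, h2⟩
          rcases hv with rfl | hv'
          · exact Or.inl h2
          · exact Or.inr ⟨v, hv', h1, h2⟩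
      · rw [ih]
        constructor
        · rintro ⟨v, hv, h1, h2⟩; exact ⟨v, List.mem_cons_of_mem _ hv, h1, h2⟩
        · rintro ⟨v, hv, h1, h2⟩
          rw [List.mem_cons] at hv
          rcases hv with rfl | hv'
          · exact absurd h1 hc
          · exact ⟨v, hv', h1, h2⟩

-- every element of seconds is a duplicate position
lemma pvBSeconds_dup (words : List String) (s : Nat)
    (hs : s ∈ pvBSeconds words (PySem.Set.ofList words)) : pvDup words s := by
  rw [mem_pvBSeconds] at hs
  obtain ⟨w, _, hcount, hse⟩ := hs
  have hwmem : w ∈ words := by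
    have := PySem.List.count_eq words w
    rw [this] at hcount
    exact List.count_pos_iff.1 (by omega)
  obtain ⟨j, hj⟩ := Option.isSome_iff_exists.1 ((PySem.List.index?_isSome_iff _ _).2 hwmem)
  obtain ⟨hjlt, hjw, hjfirst⟩ := PySem.List.getElem_of_index?_eq_some hj
  -- w occurs in the tail drop (j+1)
  have hcount_take : (words.take (j + 1)).count w = 1 := by
    rw [List.take_add_one, List.count_append]
    have h0 : (words.take j).count w = 0 := by
      rw [List.count_eq_zero]
      intro hmem
      obtain ⟨t, ht, htw⟩ := List.mem_iff_getElem.1 hmem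
      have ht' : t < j := by simpa using ht.trans_le (List.length_take_le ..)
      exact hjfirst t ht' (by rw [← htw]; simp [List.getElem_take])
    rw [h0]
    simp [hjlt, hjw]
  have hsplit : words.count w = (words.take (j + 1)).count w + (words.drop (j + 1)).count w := by
    conv_lhs => rw [← List.take_append_drop (j + 1) words]
    rw [List.count_append]
  have hdropmem : w ∈ words.drop (j + 1) := by
    rw [PySem.List.count_eq] at hcount
    apply List.count_pos_iff.1
    omega
  obtain ⟨k, hk⟩ := Option.isSome_iff_exists.1 ((PySem.List.index?_isSome_iff _ _).2 hdropmem)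
  obtain ⟨hklt, hkw, _⟩ := PySem.List.getElem_of_index?_eq_some hk
  rw [hj] at hse
  simp only [Option.getD_some] at hse
  rw [hk] at hse
  simp only [Option.getD_some] at hse
  have hslt : s < words.length := by
    have := hklt
    rw [List.length_drop] at this
    omega
  refine ⟨hslt, ?_⟩
  have hsw : words[s]'hslt = w := by
    subst hse
    rw [← hkw]
    simp [List.getElem_drop]
  rw [hsw]
  have : words[j]'hjlt ∈ words.take s := by
    apply List.mem_take_iff_getElem.2
    exact ⟨j, by omega, by simp⟩
  rwa [hjw] at this

-- the least duplicate position is in seconds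
lemma pvBSeconds_complete (words : List String) (i : Nat)
    (hd : pvDup words i) (hmin : ∀ j, j < i → ¬ pvDup words j) :
    i ∈ pvBSeconds words (PySem.Set.ofList words) := by
  obtain ⟨hi, hmem⟩ := hd
  obtain ⟨t, ht, htw⟩ := List.mem_iff_getElem.1 hmem
  have ht' : t < i := by simpa using ht.trans_le (List.length_take_le ..)
  have htw' : words[t]'(by omega) = words[i]'hi := by rw [← htw]; simp [List.getElem_take]
  have hwmem : words[i]'hi ∈ words := List.getElem_mem hi
  set w := words[i]'hi with hw
  obtain ⟨j, hj⟩ := Option.isSome_iff_exists.1 ((PySem.List.index?_isSome_iff _ _).2 hwmem)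
  obtain ⟨hjlt, hjw, hjfirst⟩ := PySem.List.getElem_of_index?_eq_some hj
  have hjt : j ≤ t := by
    by_contra hlt
    exact hjfirst t (by omega) htw'
  have hji : j < i := by omega
  -- w occurs in drop (j+1) at position i - (j+1)
  have hdi : (words.drop (j + 1))[i - (j + 1)]'(by rw [List.length_drop]; omega) = w := by
    rw [List.getElem_drop]
    have h2 : j + 1 + (i - (j + 1)) = i := by omega
    simp only [h2]
    exact hw.symm
  have hdropmem : w ∈ words.drop (j + 1) := by
    rw [← hdi]; exact List.getElem_mem _
  obtain ⟨k, hk⟩ := Option.isSome_iff_exists.1 ((PySem.List.index?_isSome_iff _ _).2 hdropmem)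
  obtain ⟨hklt, hkw, hkfirst⟩ := PySem.List.getElem_of_index?_eq_some hk
  have hki : k ≤ i - (j + 1) := by
    by_contra hlt
    exact hkfirst (i - (j + 1)) (by omega) hdi
  -- s := j + 1 + k is a duplicate position ≤ i, hence = i
  have hslt : j + 1 + k < words.length := by
    have := hklt; rw [List.length_drop] at this; omega
  have hsdup : pvDup words (j + 1 + k) := by
    refine ⟨hslt, ?_⟩
    have hsw : words[j + 1 + k]'hslt = w := by rw [← hkw]; simp [List.getElem_drop]
    rw [hsw]
    apply List.mem_take_iff_getElem.2
    exact ⟨j, by omega, by simp [hjw]⟩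
  have hsi : j + 1 + k = i := by
    by_contra hne
    exact hmin (j + 1 + k) (by omega) hsdup
  -- count w > 1: w at j in take (j+1) and w in drop (j+1)
  have hcount : 1 < PySem.List.count words w := by
    rw [PySem.List.count_eq]
    have h1 : 0 < (words.take (j + 1)).count w :=
      List.count_pos_iff.2 (List.mem_take_iff_getElem.2 ⟨j, by omega, by simp [hjw]⟩)
    have h2 : 0 < (words.drop (j + 1)).count w := List.count_pos_iff.2 hdropmem
    have hsplit : words.count w = (words.take (j + 1)).count w + (words.drop (j + 1)).count w := by
      conv_lhs => rw [← List.take_append_drop (j + 1) words]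
      rw [List.count_append]
    omega
  rw [mem_pvBSeconds]
  refine ⟨w, (PySem.Set.mem_ofList _ _).2 hwmem, hcount, ?_⟩
  rw [hj]
  simp only [Option.getD_some]
  rw [hk]
  simp only [Option.getD_some]
  omega

-- ===== VERDICT (by name: the statement is the Claim_ definition above) =====
theorem word_twice_spec : Claim_equal_word_twice := by
  intro line _
  unfold Spec_word_twice word_twice word_twice_alt
  have hA := pvALoop_eq (PySem.Str.split₀ line) [] PySem.Dict.empty (by simp)
  simp only [List.nil_append, List.length_nil, Nat.cast_zero, zero_add] at hA
  rw [hA]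
  set words := PySem.Str.split₀ line
  cases hF : pvFirst words 0 with
  | none =>
      have hnone : pvBSeconds words (PySem.Set.ofList words) = [] := by
        rw [List.eq_nil_iff_forall_not_mem]
        intro s hs
        exact pvFirst_none words 0 hF s (Nat.zero_le s) (pvBSeconds_dup words s hs)
      simp [hnone, PySem.List.min?]
  | some i =>
      obtain ⟨hdi, hmin⟩ := pvFirst_some words 0 i hF
      have hiMem := pvBSeconds_complete words i hdi (fun j hj => hmin j (Nat.zero_le j) hj)
      cases hM : PySem.List.min? (pvBSeconds words (PySem.Set.ofList words)) (fun x => x) with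
      | none =>
          rw [PySem.List.min?_eq_none_iff] at hM
          rw [hM] at hiMem
          simp at hiMem
      | some m =>
          have hmMem := PySem.List.min?_mem hM
          have hle : m ≤ i := PySem.List.min?_isMin hM i hiMem
          have hge : i ≤ m := by
            by_contra hlt
            exact hmin m (Nat.zero_le m) (by omega) (pvBSeconds_dup words m hmMem)
          have : m = i := by omega
          subst this
          simp [hM]
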